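-- pv_equiv track=rewrite | github.com/brainsmoke/esp32leddriver | firmware/stm32/m02812/src/test/test_jittertest.py | get_output_data
-- ===== SOURCE A (Python) =====
-- def get_output_data(state, init=0):
--     v = init
--     last=None
--     out = []
--     for t, val, pc in state:
--         if val != v:
--             if last != None:
--                 yield (t-last, v)
--
--             v = val
--             last = t
--     yield (-1, v)
-- ===== SOURCE B (Python) =====
-- def get_output_data(state, init=0):
--     # Pass 1: collect transition events (time, new value).
--     v = init
--     changes = []
--     for t, val, pc in state:
--         if val != v:
--             changes.append((t, val))
--             v = val
--     # Pass 2: each adjacent pair of transitions is one finished segment.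
--     for (t1, v1), (t2, _) in zip(changes, changes[1:]):
--         yield (t2 - t1, v1)
--     yield (-1, v)
-- ===== Notes on version B (the rewrite author's own statement) =====
-- stated objective: alternative
-- what changed: B splits A's fused single-pass generator into two passes: first collect (time, new value) transition events, then emit one segment per adjacent pair of events via zip(changes, changes[1:]), with the same trailing (-1, v).
import Mathlib
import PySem

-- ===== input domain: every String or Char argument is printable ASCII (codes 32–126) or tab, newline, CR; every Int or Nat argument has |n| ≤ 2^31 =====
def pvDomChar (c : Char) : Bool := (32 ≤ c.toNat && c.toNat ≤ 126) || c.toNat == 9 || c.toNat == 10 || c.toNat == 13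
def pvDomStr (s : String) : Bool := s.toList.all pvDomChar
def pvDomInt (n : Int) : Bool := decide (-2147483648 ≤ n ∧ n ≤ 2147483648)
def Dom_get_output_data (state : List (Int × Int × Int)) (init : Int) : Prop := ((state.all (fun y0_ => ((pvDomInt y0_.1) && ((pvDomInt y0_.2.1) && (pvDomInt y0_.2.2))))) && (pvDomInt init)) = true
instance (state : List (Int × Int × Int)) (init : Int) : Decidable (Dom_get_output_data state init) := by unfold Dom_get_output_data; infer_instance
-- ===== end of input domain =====

-- B: two passes (collect transition events, then emit segments from adjacent event pairs)
-- instead of A's fused single-pass generator; same output, 'alternative' objective.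

-- ===== PORT A =====
-- A's for-loop/yield as structural recursion over state, carrying (v, last) like the Python.
def pvGoA : List (Int × Int × Int) → Int → Option Int → List (Int × Int)
  | [], v, _ => [(-1, v)]
  | (t, val, _) :: rest, v, last =>
    if val ≠ v then
      (match last with
       | some l => [(t - l, v)]
       | none => []) ++ pvGoA rest val (some t)
    else
      pvGoA rest v last

def get_output_data (state : List (Int × Int × Int)) (init : Int) : List (Int × Int) :=
  pvGoA state init none

-- ===== PORT B =====
-- Pass 1 of Source B: collect the (time, new value) transition events and the final value v.
def pvCollect : List (Int × Int × Int) → Int → List (Int × Int) × Int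
  | [], v => ([], v)
  | (t, val, _) :: rest, v =>
    if val ≠ v then
      let r := pvCollect rest val
      ((t, val) :: r.1, r.2)
    else
      pvCollect rest v

-- Source B's per-pair emission: ((t1, v1), (t2, _)) ↦ (t2 - t1, v1)
def pvPair (p : (Int × Int) × (Int × Int)) : Int × Int := (p.2.1 - p.1.1, p.1.2)

def get_output_data_alt (state : List (Int × Int × Int)) (init : Int) : List (Int × Int) :=
  let r := pvCollect state init
  ((r.1.zip (r.1.drop 1)).map pvPair) ++ [(-1, r.2)]

-- ===== PRECONDITION & SPEC =====
def Spec_get_output_data (state : List (Int × Int × Int)) (init : Int) (out : List (Int × Int)) : Prop := out = get_output_data_alt state init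
instance (state : List (Int × Int × Int)) (init : Int) (out : List (Int × Int)) : Decidable (Spec_get_output_data state init out) := by unfold Spec_get_output_data; infer_instance

-- ===== CLAIM (what is proved, stated in full; the proofs are below) =====
def Claim_equal_get_output_data : Prop := ∀ (state : List (Int × Int × Int)) (init : Int), Dom_get_output_data state init → Spec_get_output_data state init (get_output_data state init)

-- ===== LEMMAS AND PROOFS =====

-- A's fused loop equals B's collect-then-pair, generalized over the carried (v, last) state.
theorem pvGoA_eq (s : List (Int × Int × Int)) : ∀ (v : Int) (last : Option Int),
    pvGoA s v last =
      (match last with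
       | none => ((pvCollect s v).1.zip ((pvCollect s v).1.drop 1)).map pvPair
       | some l => (((l, v) :: (pvCollect s v).1).zip (pvCollect s v).1).map pvPair)
      ++ [(-1, (pvCollect s v).2)] := by
  induction s with
  | nil => intro v last; cases last <;> simp [pvGoA, pvCollect]
  | cons hd tl ih =>
    intro v last
    obtain ⟨t, val, pc⟩ := hd
    by_cases h : val = v
    · subst h
      cases last <;> simp [pvGoA, pvCollect, ih]
    · cases last <;>
        simp [pvGoA, pvCollect, h, ih, pvPair, List.zip_cons_cons]

-- ===== VERDICT (by name: the statement is the Claim_ definition above) =====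
theorem get_output_data_spec : Claim_equal_get_output_data := by
  intro state init _
  unfold Spec_get_output_data get_output_data get_output_data_alt
  simpa using pvGoA_eq state init none
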